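-- pv_equiv track=rewrite | github.com/tashakim/puzzles_python | findconcmax.py | findConsecutiveMax
-- ===== SOURCE A (Python) =====
-- def findConsecutiveMax(arr):
--   """Purpose:  returns character that occurs the greatest no. of consec times.
--   arr -> char
--   """
--   max_count = 1
--   count = 1
--   cur = arr[0]
--   char = cur
--
--   for i in range(1,len(arr)):
--     if(arr[i] == cur):
--       count +=1
--       if(count > max_count):
--         max_count = count
--         char = arr[i]
--
--     else:
--       count = 1
--     cur = arr[i]
--
--   return char
-- ===== SOURCE B (Python) =====
-- def findConsecutiveMax(arr):
--     """Returns the character with the most consecutive repetitions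
--     (first such run wins ties). Scans run by run with two indices."""
--     best_char = arr[0]
--     best_len = 0
--     n = len(arr)
--     i = 0
--     while i < n:
--         c = arr[i]
--         j = i + 1
--         while j < n and arr[j] == c:
--             j += 1
--         if j - i > best_len:
--             best_char = c
--             best_len = j - i
--         i = j
--     return best_char
-- ===== Notes on version B (the rewrite author's own statement) =====
-- stated objective: alternative
-- what changed: Replaces A's element-by-element scan with running count/max_count state by a two-pointer run-at-a-time scan: an inner loop finds the end of each run, and the best run (strictly longer wins, so first maximal run is kept) is tracked directly.
import Mathlib
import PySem

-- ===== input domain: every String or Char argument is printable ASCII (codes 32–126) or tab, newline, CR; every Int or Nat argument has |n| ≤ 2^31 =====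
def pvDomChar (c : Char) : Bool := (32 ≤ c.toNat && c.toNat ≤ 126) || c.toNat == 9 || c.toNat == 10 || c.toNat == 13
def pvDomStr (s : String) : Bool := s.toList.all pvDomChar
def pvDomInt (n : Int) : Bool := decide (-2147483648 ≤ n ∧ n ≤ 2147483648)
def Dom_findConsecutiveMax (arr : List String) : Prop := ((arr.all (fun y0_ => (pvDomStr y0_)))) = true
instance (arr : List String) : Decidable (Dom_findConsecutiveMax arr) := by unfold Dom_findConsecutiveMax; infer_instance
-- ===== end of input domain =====

-- B replaces A's element-by-element scan (count/max_count bookkeeping) by a two-pointer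
-- run-at-a-time scan; equivalence is proved for non-empty input (both raise IndexError on []).

-- ===== PORT A =====
-- one loop iteration of A's for-loop (state: max_count, count, cur, char)
def pvStepA (arr : List String) (st : Int × Int × String × String) (i : Int) :
    Int × Int × String × String :=
  let maxc := st.1; let cnt := st.2.1; let cur := st.2.2.1; let chr := st.2.2.2
  let ai := (PySem.List.pyGet? arr i).getD ""
  if ai = cur then
    let cnt := cnt + 1
    if cnt > maxc then (cnt, cnt, ai, ai) else (maxc, cnt, ai, chr)
  else (maxc, 1, ai, chr)

def findConsecutiveMax (arr : List String) : String :=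
  let cur := (PySem.List.pyGet? arr 0).getD ""
  let s := (PySem.List.pyRange 1 (arr.length : Int) 1).foldl (pvStepA arr) (1, 1, cur, cur)
  s.2.2.2

-- ===== PORT B =====
-- inner while loop of Source B: advance j while j < n and arr[j] == c
def pvAltInner (arr : List String) (n : Int) (c : String) (j : Int) : Int :=
  if _h : j < n ∧ (PySem.List.pyGet? arr j).getD "" = c then pvAltInner arr n c (j + 1)
  else j
termination_by (n - j).toNat
decreasing_by omega

theorem pvAltInner_ge (arr : List String) (n : Int) (c : String) (j : Int) :
    j ≤ pvAltInner arr n c j := by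
  unfold pvAltInner
  split
  · have := pvAltInner_ge arr n c (j + 1); omega
  · omega
termination_by (n - j).toNat
decreasing_by omega

-- outer while loop of Source B (state: best_char, best_len, index i)
def pvAltOuter (arr : List String) (n : Int) (bc : String) (bl : Int) (i : Int) : String :=
  if _h : i < n then
    let c := (PySem.List.pyGet? arr i).getD ""
    let j := pvAltInner arr n c (i + 1)
    if j - i > bl then pvAltOuter arr n c (j - i) j else pvAltOuter arr n bc bl j
  else bc
termination_by (n - i).toNat
decreasing_by
  all_goals have := pvAltInner_ge arr n ((PySem.List.pyGet? arr i).getD "") (i + 1); omega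

def findConsecutiveMax_alt (arr : List String) : String :=
  pvAltOuter arr (arr.length : Int) ((PySem.List.pyGet? arr 0).getD "") 0 0

-- ===== PRECONDITION & SPEC =====
-- A evaluates arr[0] first, so the empty list raises IndexError (in both A and B): excluded.
def Pre_findConsecutiveMax (arr : List String) : Prop := arr ≠ []
instance (arr : List String) : Decidable (Pre_findConsecutiveMax arr) := by
  unfold Pre_findConsecutiveMax; infer_instance
def pvWitness_findConsecutiveMax : List String := (["a", "a", "b"])

def Spec_findConsecutiveMax (arr : List String) (out : String) : Prop := out = findConsecutiveMax_alt arr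
instance (arr : List String) (out : String) : Decidable (Spec_findConsecutiveMax arr out) := by unfold Spec_findConsecutiveMax; infer_instance

-- ===== CLAIM (what is proved, stated in full; the proofs are below) =====
def Claim_equal_findConsecutiveMax : Prop := ∀ (arr : List String), Dom_findConsecutiveMax arr → Pre_findConsecutiveMax arr → Spec_findConsecutiveMax arr (findConsecutiveMax arr)

-- ===== LEMMAS AND PROOFS =====

-- length of the run of c at the front of the list
def pvCountP (c : String) : List String → Nat
  | [] => 0
  | x :: xs => if x = c then pvCountP c xs + 1 else 0

-- A's loop, re-expressed as structural recursion over the tail list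
def pvLoopAL (maxc cnt : Int) (cur chr : String) : List String → String
  | [] => chr
  | x :: xs =>
    if x = cur then
      if cnt + 1 > maxc then pvLoopAL (cnt + 1) (cnt + 1) x x xs
      else pvLoopAL maxc (cnt + 1) x chr xs
    else pvLoopAL maxc 1 x chr xs

-- the consecutive runs of a list, as (char, length) pairs
def pvRunsOf : List String → List (String × Int)
  | [] => []
  | x :: xs => (x, 1 + (pvCountP x xs : Int)) :: pvRunsOf (xs.drop (pvCountP x xs))
termination_by l => l.length
decreasing_by simp

-- fold selecting the first strictly-longest run
def pvPickBest (bc : String) (bl : Int) : List (String × Int) → String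
  | [] => bc
  | (c, L) :: rs => if L > bl then pvPickBest c L rs else pvPickBest bc bl rs

theorem pvPickBest_cons (bc c : String) (bl L : Int) (rs : List (String × Int)) :
    pvPickBest bc bl ((c, L) :: rs) = if L > bl then pvPickBest c L rs else pvPickBest bc bl rs := rfl

theorem pvLoopAL_eq_pickBest (xs : List String) (cur : String) (maxc cnt : Int) (chr : String)
    (h1 : cnt ≤ maxc) (h2 : 1 ≤ cnt) :
    pvLoopAL maxc cnt cur chr xs
      = pvPickBest chr maxc ((cur, cnt + (pvCountP cur xs : Int)) :: pvRunsOf (xs.drop (pvCountP cur xs))) := by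
  induction xs generalizing cur maxc cnt chr with
  | nil =>
    simp only [pvLoopAL, pvCountP, pvRunsOf, List.drop_nil, Nat.cast_zero, add_zero, pvPickBest]
    rw [if_neg (by omega)]
  | cons x xs ih =>
    by_cases hx : x = cur
    · subst hx
      have hc : pvCountP x (x :: xs) = pvCountP x xs + 1 := by simp [pvCountP]
      rw [hc, List.drop_succ_cons, pvPickBest_cons,
        show pvLoopAL maxc cnt x chr (x :: xs)
          = if cnt + 1 > maxc then pvLoopAL (cnt + 1) (cnt + 1) x x xs
            else pvLoopAL maxc (cnt + 1) x chr xs from by simp [pvLoopAL]]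
      have he : cnt + ((pvCountP x xs + 1 : Nat) : Int) = (cnt + 1) + (pvCountP x xs : Int) := by
        push_cast; ring
      by_cases hgt : cnt + 1 > maxc
      · rw [if_pos hgt, if_pos (by push_cast; omega),
          ih x (cnt + 1) (cnt + 1) x le_rfl (by omega), pvPickBest_cons, he]
        rcases Nat.eq_zero_or_pos (pvCountP x xs) with hm | hm
        · simp [hm]
        · rw [if_pos (by omega)]
      · rw [if_neg hgt, ih x maxc (cnt + 1) chr (by omega) (by omega), pvPickBest_cons, he]
    · have hc : pvCountP cur (x :: xs) = 0 := by simp [pvCountP, hx]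
      rw [hc]
      simp only [Nat.cast_zero, add_zero, List.drop_zero, pvPickBest_cons]
      rw [if_neg (by omega)]
      conv_rhs => rw [pvRunsOf]
      rw [show pvLoopAL maxc cnt cur chr (x :: xs) = pvLoopAL maxc 1 x chr xs from by
        simp [pvLoopAL, hx]]
      rw [ih x maxc 1 chr (by omega) le_rfl]

theorem pvBridgeA (arr : List String) (k i : Nat) (hk : arr.length - i ≤ k)
    (maxc cnt : Int) (cur chr : String) :
    ((PySem.List.pyRange (i : Int) (arr.length : Int) 1).foldl (pvStepA arr) (maxc, cnt, cur, chr)).2.2.2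
      = pvLoopAL maxc cnt cur chr (arr.drop i) := by
  induction k generalizing i maxc cnt cur chr with
  | zero =>
    have hle : arr.length ≤ i := by omega
    rw [PySem.List.pyRange_one, show (((arr.length : Int)) - (i : Int)).toNat = 0 from by omega]
    simp [List.drop_eq_nil_of_le hle, pvLoopAL]
  | succ k ih =>
    by_cases hi : i < arr.length
    · rw [PySem.List.pyRange_one_cons (by exact_mod_cast hi), List.foldl_cons,
        List.drop_eq_getElem_cons hi]
      have hai : (PySem.List.pyGet? arr (i : Int)).getD "" = arr[i] := by
        rw [PySem.List.pyGet?_natCast, List.getElem?_eq_getElem hi, Option.getD_some]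
      have hei : (i : Int) + 1 = ((i + 1 : Nat) : Int) := by push_cast; ring
      simp only [pvStepA, pvLoopAL, hai, hei]
      by_cases hcur : arr[i] = cur
      · simp only [if_pos hcur]
        by_cases hgt : cnt + 1 > maxc
        · simp only [if_pos hgt]; exact ih (i + 1) (by omega) (cnt + 1) (cnt + 1) arr[i] arr[i]
        · simp only [if_neg hgt]; exact ih (i + 1) (by omega) maxc (cnt + 1) arr[i] chr
      · simp only [if_neg hcur]; exact ih (i + 1) (by omega) maxc 1 arr[i] chr
    · have hle : arr.length ≤ i := by omega
      rw [PySem.List.pyRange_one, show (((arr.length : Int)) - (i : Int)).toNat = 0 from by omega]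
      simp [List.drop_eq_nil_of_le hle, pvLoopAL]

theorem pvAltInner_eq (arr : List String) (c : String) (j : Int) (h0 : 0 ≤ j) :
    pvAltInner arr (arr.length : Int) c j = j + (pvCountP c (arr.drop j.toNat) : Int) := by
  rw [pvAltInner]
  split
  · rename_i h
    obtain ⟨hj, hc⟩ := h
    have hjn : j.toNat < arr.length := by omega
    have hai : arr[j.toNat] = c := by
      rwa [PySem.List.pyGet?_of_nonneg arr h0, List.getElem?_eq_getElem hjn, Option.getD_some] at hc
    rw [pvAltInner_eq arr c (j + 1) (by omega), List.drop_eq_getElem_cons hjn,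
      show (j + 1).toNat = j.toNat + 1 from by omega]
    simp [pvCountP, hai]
    omega
  · rename_i h
    by_cases hj : j < (arr.length : Int)
    · have hjn : j.toNat < arr.length := by omega
      have hne : ¬ arr[j.toNat] = c := by
        intro hEq
        exact h ⟨hj, by rw [PySem.List.pyGet?_of_nonneg arr h0, List.getElem?_eq_getElem hjn,
          Option.getD_some, hEq]⟩
      rw [List.drop_eq_getElem_cons hjn]
      simp [pvCountP, hne]
    · rw [List.drop_eq_nil_of_le (by omega)]
      simp [pvCountP]
termination_by ((arr.length : Int) - j).toNat
decreasing_by omega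

theorem pvAltOuter_eq (arr : List String) (bc : String) (bl : Int) (i : Int) (h0 : 0 ≤ i) :
    pvAltOuter arr (arr.length : Int) bc bl i = pvPickBest bc bl (pvRunsOf (arr.drop i.toNat)) := by
  rw [pvAltOuter]
  split
  · rename_i hi
    have hjn : i.toNat < arr.length := by omega
    have hai : (PySem.List.pyGet? arr i).getD "" = arr[i.toNat] := by
      rw [PySem.List.pyGet?_of_nonneg arr h0, List.getElem?_eq_getElem hjn, Option.getD_some]
    have hInner := pvAltInner_eq arr arr[i.toNat] (i + 1) (by omega)
    have hdrop : arr.drop i.toNat = arr[i.toNat] :: arr.drop (i.toNat + 1) :=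
      List.drop_eq_getElem_cons hjn
    have ht : (i + 1).toNat = i.toNat + 1 := by omega
    rw [ht] at hInner
    conv_rhs => rw [hdrop, pvRunsOf]
    rw [pvPickBest_cons]
    set m := pvCountP arr[i.toNat] (arr.drop (i.toNat + 1)) with hm
    have hji : pvAltInner arr (↑arr.length) ((PySem.List.pyGet? arr i).getD "") (i + 1)
        = i + 1 + (m : Int) := by rw [hai, hInner]
    have hdrop2 : (arr.drop (i.toNat + 1)).drop m = arr.drop (i.toNat + 1 + m) := by
      rw [List.drop_drop]
    by_cases hbl : 1 + (m : Int) > bl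
    · rw [if_pos (by omega), if_pos hbl, pvAltOuter_eq arr _ _ _ (by omega), hji, hai,
        show i + 1 + (m : Int) - i = 1 + (m : Int) from by omega,
        show (i + 1 + (m : Int)).toNat = i.toNat + 1 + m from by omega, ← hdrop2]
    · rw [if_neg (by omega), if_neg hbl, pvAltOuter_eq arr _ _ _ (by omega), hji,
        show (i + 1 + (m : Int)).toNat = i.toNat + 1 + m from by omega, ← hdrop2]
  · rename_i hi
    rw [List.drop_eq_nil_of_le (by omega)]
    simp [pvRunsOf, pvPickBest]
termination_by ((arr.length : Int) - i).toNat
decreasing_by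
  all_goals omega

-- ===== VERDICT (by name: the statement is the Claim_ definition above) =====
theorem findConsecutiveMax_spec : Claim_equal_findConsecutiveMax := by
  intro arr _hdom hpre
  unfold Spec_findConsecutiveMax
  obtain ⟨a, rest, rfl⟩ : ∃ a rest, arr = a :: rest := by
    cases arr with
    | nil => exact absurd rfl hpre
    | cons a rest => exact ⟨a, rest, rfl⟩
  unfold findConsecutiveMax findConsecutiveMax_alt
  have h0 : (PySem.List.pyGet? (a :: rest) 0).getD "" = a := by
    rw [PySem.List.pyGet?_zero_cons, Option.getD_some]
  simp only [h0]
  have hA := pvBridgeA (a :: rest) (a :: rest).length 1 (by omega) 1 1 a a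
  rw [show ((1 : Nat) : Int) = (1 : Int) from rfl] at hA
  rw [hA, List.drop_one, List.tail_cons,
    pvLoopAL_eq_pickBest rest a 1 1 a le_rfl le_rfl,
    pvAltOuter_eq (a :: rest) a 0 0 le_rfl,
    show ((0 : Int).toNat) = 0 from rfl, List.drop_zero]
  conv_rhs => rw [pvRunsOf]
  rw [pvPickBest_cons, pvPickBest_cons]
  conv_rhs => rw [if_pos (show (1 : Int) + (pvCountP a rest : Int) > 0 by omega)]
  rcases Nat.eq_zero_or_pos (pvCountP a rest) with hm | hm
  · simp [hm]
  · rw [if_pos (by omega)]
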